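-- pv_equiv track=rewrite | github.com/shanzhaii/advent-of-code-2024-shanzhaii | project/day22/monkey_market.py | find_best_sequence
-- ===== SOURCE A (Python) =====
-- def mix(value, secret_number):
--     return value ^ secret_number
--
-- def prune(secret_number):
--     return secret_number % 16777216
--
-- def calculate(secret_number):
--     secret_number = prune(mix(secret_number * 64, secret_number))
--     secret_number = prune(mix(int(secret_number / 32), secret_number))
--     return prune(mix(secret_number * 2048, secret_number))
--
-- def calculate_sequence_to_price(secret_number, n, sequences):
--     price = int(str(secret_number)[-1])
--     changes = []
--     last_price = price
--     sequence_to_price = {}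
--     for _ in range(n):
--         secret_number = calculate(secret_number)
--         price = int(str(secret_number)[-1])
--         changes.append(price - last_price)
--         if len(changes) >= 4:
--             sequence = (changes[-4], changes[-3], changes[-2], changes[-1])
--             if sequence not in sequence_to_price:
--                 sequences.add(sequence)
--                 sequence_to_price[sequence] = price
--         last_price = price
--     return sequence_to_price
--
-- def find_best_sequence(input, n):
--     all_sequences = set()
--     sequence_to_prices = list(
--         map(lambda secret_number: calculate_sequence_to_price(secret_number, n, all_sequences), input))
--     max_bananas = 0
--     for sequence in all_sequences:
--         bananas = sum(map(lambda sequence_to_price: sequence_to_price.get(sequence, 0), sequence_to_prices))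
--         max_bananas = max(max_bananas, bananas)
--     return max_bananas
-- ===== SOURCE B (Python) =====
-- def find_best_sequence(input, n):
--     M = 16777216
--     totals = {}
--     for secret in input:
--         last_price = abs(secret) % 10
--         c1 = c2 = c3 = 0
--         seen = set()
--         for i in range(n):
--             secret = ((secret * 64) ^ secret) % M
--             secret = ((secret // 32) ^ secret) % M
--             secret = ((secret * 2048) ^ secret) % M
--             price = secret % 10
--             change = price - last_price
--             if i >= 3:
--                 seq = (c1, c2, c3, change)
--                 if seq not in seen:
--                     seen.add(seq)
--                     totals[seq] = totals.get(seq, 0) + price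
--             c1, c2, c3 = c2, c3, change
--             last_price = price
--     best = 0
--     for v in totals.values():
--         best = max(best, v)
--     return best
-- ===== Notes on version B (the rewrite author's own statement) =====
-- stated objective: faster
-- what changed: B makes one pass per buyer with a rolling 4-change window, a per-buyer seen-set and one global sequence->total-bananas dict updated in place, then takes the max over the dict's values, instead of A's per-buyer dicts that are afterwards re-scanned once per distinct sequence (sum over all buyers for every sequence).
import Mathlib
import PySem

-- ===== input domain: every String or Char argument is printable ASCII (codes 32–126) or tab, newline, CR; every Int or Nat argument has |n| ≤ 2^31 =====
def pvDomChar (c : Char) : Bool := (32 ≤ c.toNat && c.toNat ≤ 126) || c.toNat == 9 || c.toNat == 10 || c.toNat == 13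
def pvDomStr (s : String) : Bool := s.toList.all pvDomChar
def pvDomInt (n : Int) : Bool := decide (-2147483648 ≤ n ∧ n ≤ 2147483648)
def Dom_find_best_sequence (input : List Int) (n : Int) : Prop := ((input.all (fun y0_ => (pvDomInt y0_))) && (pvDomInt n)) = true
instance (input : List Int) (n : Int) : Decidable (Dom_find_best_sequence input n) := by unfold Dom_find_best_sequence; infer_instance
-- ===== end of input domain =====

-- B replaces A's per-buyer dicts + per-sequence cross-buyer summation by one global totals
-- dict filled in a single pass (objective: faster). A's in-place mutation of its local set is
-- internal only; return values are what is compared.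

abbrev PvSeq := Int × Int × Int × Int

-- ===== PORT A =====
def pyMix (value secret_number : Int) : Int := PySem.Int.bxor value secret_number

def pyPrune (secret_number : Int) : Int := PySem.Int.mod secret_number 16777216

def pyCalculate (secret_number : Int) : Int :=
  let s1 := pyPrune (pyMix (secret_number * 64) secret_number)
  -- int(s1 / 32): float division is exact here (0 ≤ s1 < 2^24 < 2^53), and int() truncates,
  -- which PySem.Int.truncdiv models exactly on this range
  let s2 := pyPrune (pyMix (PySem.Int.truncdiv s1 32) s1)
  pyPrune (pyMix (s2 * 2048) s2)

-- int(str(s)[-1]); str(s) is never empty so the none branch is unreachable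
def pyLastDigit (s : Int) : Int :=
  match PySem.List.pyGet? (PySem.Int.toChars s) (-1) with
  | some c => (PySem.Int.ofChars? [c]).getD 0
  | none => 0

structure PvAState where
  secret : Int
  changes : List Int
  lastPrice : Int
  stp : PySem.Dict PvSeq Int
  seqs : PySem.Set PvSeq
deriving Repr, DecidableEq

-- one iteration of the loop body of calculate_sequence_to_price
def pyCstpStep (st : PvAState) : PvAState :=
  let secret := pyCalculate st.secret
  let price := pyLastDigit secret
  let changes := st.changes ++ [price - st.lastPrice]
  if 4 ≤ changes.length then
    let sequence : PvSeq := (PySem.List.pyGetD changes (-4) 0, PySem.List.pyGetD changes (-3) 0,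
                             PySem.List.pyGetD changes (-2) 0, PySem.List.pyGetD changes (-1) 0)
    if st.stp.contains sequence = false then
      { secret := secret, changes := changes, lastPrice := price,
        stp := st.stp.insert sequence price, seqs := PySem.Set.add st.seqs sequence }
    else
      { secret := secret, changes := changes, lastPrice := price, stp := st.stp, seqs := st.seqs }
  else { secret := secret, changes := changes, lastPrice := price, stp := st.stp, seqs := st.seqs }

-- Python mutates the argument set `sequences` in place; the updated set is returned here
def calculate_sequence_to_price (secret_number n : Int) (sequences : PySem.Set PvSeq) :
    PySem.Dict PvSeq Int × PySem.Set PvSeq :=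
  let price := pyLastDigit secret_number
  let st := (PySem.List.pyRange 0 n 1).foldl (fun st _ => pyCstpStep st)
      { secret := secret_number, changes := [], lastPrice := price,
        stp := PySem.Dict.empty, seqs := sequences }
  (st.stp, st.seqs)

def find_best_sequence (input : List Int) (n : Int) : Int :=
  -- list(map(...)) threading the mutated all_sequences set
  let acc := input.foldl
    (fun (acc : PySem.Set PvSeq × List (PySem.Dict PvSeq Int)) secret_number =>
      let r := calculate_sequence_to_price secret_number n acc.1
      (r.2, acc.2 ++ [r.1]))
    (PySem.Set.empty, [])
  acc.1.foldl
    (fun max_bananas sequence =>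
      max max_bananas ((acc.2.map (fun sequence_to_price => sequence_to_price.getD sequence 0)).sum))
    0

-- ===== PORT B =====
def altStep (s : Int) : Int :=
  let s1 := PySem.Int.mod (PySem.Int.bxor (s * 64) s) 16777216
  let s2 := PySem.Int.mod (PySem.Int.bxor (PySem.Int.floordiv s1 32) s1) 16777216
  PySem.Int.mod (PySem.Int.bxor (s2 * 2048) s2) 16777216

structure PvBState where
  secret : Int
  c1 : Int
  c2 : Int
  c3 : Int
  lastPrice : Int
  seen : PySem.Set PvSeq
  totals : PySem.Dict PvSeq Int
deriving Repr, DecidableEq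

-- one iteration of B's inner loop (i is the loop index)
def altBuyerStep (st : PvBState) (i : Int) : PvBState :=
  let secret := altStep st.secret
  let price := PySem.Int.mod secret 10
  let change := price - st.lastPrice
  let st' :=
    if 3 ≤ i then
      let seq : PvSeq := (st.c1, st.c2, st.c3, change)
      if PySem.Set.contains st.seen seq = false then
        { st with seen := PySem.Set.add st.seen seq,
                  totals := st.totals.insert seq (st.totals.getD seq 0 + price) }
      else st
    else st
  { st' with secret := secret, c1 := st.c2, c2 := st.c3, c3 := change, lastPrice := price }

def find_best_sequence_alt (input : List Int) (n : Int) : Int :=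
  let totals := input.foldl
    (fun (totals : PySem.Dict PvSeq Int) secret0 =>
      ((PySem.List.pyRange 0 n 1).foldl altBuyerStep
        { secret := secret0, c1 := 0, c2 := 0, c3 := 0,
          lastPrice := PySem.Int.mod |secret0| 10,
          seen := PySem.Set.empty, totals := totals }).totals)
    PySem.Dict.empty
  totals.values.foldl (fun best v => max best v) 0

-- ===== PRECONDITION & SPEC =====
def Spec_find_best_sequence (input : List Int) (n : Int) (out : Int) : Prop := out = find_best_sequence_alt input n
instance (input : List Int) (n : Int) (out : Int) : Decidable (Spec_find_best_sequence input n out) := by unfold Spec_find_best_sequence; infer_instance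

-- ===== CLAIM (what is proved, stated in full; the proofs are below) =====
def Claim_equal_find_best_sequence : Prop := ∀ (input : List Int) (n : Int), Dom_find_best_sequence input n → Spec_find_best_sequence input n (find_best_sequence input n)

-- ===== LEMMAS AND PROOFS =====

-- str(s) always ends with the decimal digit |s| % 10
lemma pv_toDigitsCore_last (fuel : Nat) : ∀ (n : Nat) (ds : List Char), 0 < fuel →
    ∃ pre, Nat.toDigitsCore 10 fuel n ds = pre ++ (Nat.digitChar (n % 10) :: ds) := by
  induction fuel with
  | zero => intro n ds h; omega
  | succ f ih =>
    intro n ds _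
    rw [Nat.toDigitsCore]
    by_cases h10 : n / 10 = 0
    · simp [h10]
    · simp only [h10]
      cases f with
      | zero => exact ⟨[], by rw [Nat.toDigitsCore]; simp⟩
      | succ g =>
        obtain ⟨pre, hp⟩ := ih (n / 10) (Nat.digitChar (n % 10) :: ds) (Nat.succ_pos g)
        exact ⟨pre ++ [Nat.digitChar (n / 10 % 10)], by rw [hp]; simp⟩

lemma pv_digit_ofChars (k : Nat) (hk : k < 10) :
    PySem.Int.ofChars? [Nat.digitChar k] = some (k : Int) := by
  interval_cases k <;> decide

lemma pv_toDigits_last (m : Nat) :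
    (Nat.toDigits 10 m).getLast? = some (Nat.digitChar (m % 10)) := by
  obtain ⟨pre, hp⟩ := pv_toDigitsCore_last (m + 1) m [] (Nat.succ_pos m)
  unfold Nat.toDigits
  rw [hp]
  simp

lemma pv_lastDigit_eq (s : Int) : pyLastDigit s = PySem.Int.mod |s| 10 := by
  have hmod : PySem.Int.mod |s| 10 = ((s.natAbs % 10 : Nat) : Int) := by
    rw [PySem.Int.mod_eq_emod_of_pos (by norm_num)]
    rw [Int.abs_eq_natAbs]
    push_cast
    rfl
  rw [hmod]
  unfold pyLastDigit
  by_cases hs : s < 0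
  · have ht : PySem.Int.toChars s = '-' :: Nat.toDigits 10 s.natAbs := by
      simp [PySem.Int.toChars, hs]
    rw [ht, PySem.List.pyGet?_neg_one]
    have h2 : ('-' :: Nat.toDigits 10 s.natAbs).getLast? = some (Nat.digitChar (s.natAbs % 10)) := by
      rw [List.getLast?_cons, pv_toDigits_last]
      simp
    rw [h2]
    simp [pv_digit_ofChars _ (Nat.mod_lt _ (by norm_num))]
  · have ht : PySem.Int.toChars s = Nat.toDigits 10 s.toNat := by
      simp [PySem.Int.toChars, hs]
    rw [ht, PySem.List.pyGet?_neg_one, pv_toDigits_last]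
    have hna : s.toNat = s.natAbs := by omega
    rw [hna]
    simp [pv_digit_ofChars _ (Nat.mod_lt _ (by norm_num))]

lemma pv_calculate_eq (s : Int) : pyCalculate s = altStep s := by
  have h1 : 0 ≤ PySem.Int.mod (PySem.Int.bxor (s * 64) s) 16777216 :=
    PySem.Int.mod_nonneg _ (by norm_num)
  have key : PySem.Int.truncdiv (PySem.Int.mod (PySem.Int.bxor (s * 64) s) 16777216) 32
      = PySem.Int.floordiv (PySem.Int.mod (PySem.Int.bxor (s * 64) s) 16777216) 32 := by
    rw [PySem.Int.floordiv_eq_ediv_of_pos (by norm_num)]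
    exact Int.tdiv_eq_ediv_of_nonneg h1
  simp only [pyCalculate, altStep, pyPrune, pyMix, key]

lemma pv_altStep_nonneg (s : Int) : 0 ≤ altStep s :=
  PySem.Int.mod_nonneg _ (by norm_num)

lemma pv_price_eq (s : Int) : pyLastDigit (pyCalculate s) = PySem.Int.mod (altStep s) 10 := by
  rw [pv_calculate_eq, pv_lastDigit_eq, abs_of_nonneg (pv_altStep_nonneg s)]

lemma pv_getD_append_last (ch : List Int) (x : Int) : (ch ++ [x]).getD ch.length 0 = x := by
  simp [List.getD_eq_getElem?_getD]

lemma pv_getD_append_left (ch : List Int) (x : Int) (j : Nat) (h : j < ch.length) :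
    (ch ++ [x]).getD j 0 = ch.getD j 0 := by
  simp [List.getD_eq_getElem?_getD, List.getElem?_append_left h]

lemma pv_set_update_snoc {α : Type} [BEq α] (s : PySem.Set α) (xs : List α) (x : α) :
    PySem.Set.update s (xs ++ [x]) = PySem.Set.add (PySem.Set.update s xs) x := by
  rw [PySem.Set.update_append, PySem.Set.update_cons, PySem.Set.update_nil]

-- the coupling invariant between A's and B's per-buyer loop states
def PvInv (t0 : PySem.Dict PvSeq Int) (sq0 : PySem.Set PvSeq) (a : PvAState) (b : PvBState) : Prop :=
  b.secret = a.secret ∧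
  b.lastPrice = a.lastPrice ∧
  (1 ≤ a.changes.length → b.c3 = a.changes.getD (a.changes.length - 1) 0) ∧
  (2 ≤ a.changes.length → b.c2 = a.changes.getD (a.changes.length - 2) 0) ∧
  (3 ≤ a.changes.length → b.c1 = a.changes.getD (a.changes.length - 3) 0) ∧
  b.seen = a.stp.keys ∧
  a.stp.keys.Nodup ∧
  (∀ q, b.totals.getD q 0 = t0.getD q 0 + a.stp.getD q 0) ∧
  b.totals.keys = PySem.Set.update t0.keys a.stp.keys ∧
  a.seqs = PySem.Set.update sq0 a.stp.keys

lemma pv_step_inv (t0 : PySem.Dict PvSeq Int) (sq0 : PySem.Set PvSeq)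
    (a : PvAState) (b : PvBState) (h : PvInv t0 sq0 a b) :
    PvInv t0 sq0 (pyCstpStep a) (altBuyerStep b (a.changes.length : Int)) ∧
    (pyCstpStep a).changes.length = a.changes.length + 1 := by
  obtain ⟨sA, ch, lp, d, sq⟩ := a
  obtain ⟨sB, c1, c2, c3, lpB, seen, t⟩ := b
  obtain ⟨hsec, hlp, hc3, hc2, hc1, hseen, hnd, hget, hkeys, hsq⟩ := h
  simp only at hsec hlp hc3 hc2 hc1 hseen hnd hget hkeys hsq
  subst hsec hlp hseen
  simp only [pyCstpStep, altBuyerStep, pv_price_eq, ← pv_calculate_eq]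
  constructor
  case right => split_ifs <;> simp
  set x := PySem.Int.mod (pyCalculate sB) 10 - lpB with hx
  set ch' := ch ++ [x] with hch'
  have hlen' : ch'.length = ch.length + 1 := by simp [hch']
  by_cases hbig : 3 ≤ ch.length
  · -- window full: both sides consider the 4-change sequence
    have hA4 : 4 ≤ ch'.length := by omega
    rw [if_pos hA4]
    have e4 : PySem.List.pyGetD ch' (-4) 0 = c1 := by
      rw [PySem.List.pyGetD_neg_ofNat ch' 4 0 (by norm_num) (by omega)]
      rw [← List.getD_eq_getElem ch' 0 (by omega), hch',
        show ch'.length - 4 = ch.length - 3 by omega,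
        pv_getD_append_left ch _ _ (by omega), hc1 hbig]
    have e3 : PySem.List.pyGetD ch' (-3) 0 = c2 := by
      rw [PySem.List.pyGetD_neg_ofNat ch' 3 0 (by norm_num) (by omega)]
      rw [← List.getD_eq_getElem ch' 0 (by omega), hch',
        show ch'.length - 3 = ch.length - 2 by omega,
        pv_getD_append_left ch _ _ (by omega), hc2 (by omega)]
    have e2 : PySem.List.pyGetD ch' (-2) 0 = c3 := by
      rw [PySem.List.pyGetD_neg_ofNat ch' 2 0 (by norm_num) (by omega)]
      rw [← List.getD_eq_getElem ch' 0 (by omega), hch',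
        show ch'.length - 2 = ch.length - 1 by omega,
        pv_getD_append_left ch _ _ (by omega), hc3 (by omega)]
    have e1 : PySem.List.pyGetD ch' (-1) 0 = x := by
      rw [PySem.List.pyGetD_neg_ofNat ch' 1 0 (by norm_num) (by omega)]
      rw [← List.getD_eq_getElem ch' 0 (by omega), hch',
        show ch'.length - 1 = ch.length by omega, pv_getD_append_last]
    rw [e4, e3, e2, e1]
    have hB3 : (3:Int) ≤ (ch.length : Int) := by exact_mod_cast hbig
    rw [if_pos hB3]
    set q0 : PvSeq := (c1, c2, c3, x) with hq0
    by_cases hmem : q0 ∈ d.keys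
    · -- sequence already recorded for this buyer: both sides skip
      have hA : d.contains q0 = true := by
        rw [PySem.Dict.contains_eq_decide_mem_keys]; simp [hmem]
      have hB : PySem.Set.contains d.keys q0 = true := (PySem.Set.contains_iff _ _).2 hmem
      rw [hA, hB]
      simp only [show ((true = false)) = False by simp, if_false]
      unfold PvInv
      refine ⟨rfl, rfl, ?_, ?_, ?_, rfl, hnd, hget, hkeys, hsq⟩
      · intro _
        simp only [hch', List.length_append, List.length_singleton,
          Nat.add_sub_cancel, pv_getD_append_last]
      · intro _
        rw [hch']
        simp only [List.length_append, List.length_singleton]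
        rw [show ch.length + 1 - 2 = ch.length - 1 by omega,
          pv_getD_append_left ch _ _ (by omega)]
        exact hc3 (by omega)
      · intro _
        rw [hch']
        simp only [List.length_append, List.length_singleton]
        rw [show ch.length + 1 - 3 = ch.length - 2 by omega,
          pv_getD_append_left ch _ _ (by omega)]
        exact hc2 (by omega)
    · -- fresh sequence: A inserts into its per-buyer dict, B adds into the global totals
      have hA : d.contains q0 = false := by
        rw [PySem.Dict.contains_eq_decide_mem_keys]; simp [hmem]
      have hB : PySem.Set.contains d.keys q0 = false := by
        cases hcb : PySem.Set.contains d.keys q0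
        · rfl
        · exact absurd ((PySem.Set.contains_iff _ _).1 hcb) hmem
      rw [hA, hB]
      simp only [reduceIte]
      unfold PvInv
      refine ⟨rfl, rfl, ?_, ?_, ?_, ?_, ?_, ?_, ?_, ?_⟩
      · intro _
        simp only [hch', List.length_append, List.length_singleton,
          Nat.add_sub_cancel, pv_getD_append_last]
      · intro _
        rw [hch']
        simp only [List.length_append, List.length_singleton]
        rw [show ch.length + 1 - 2 = ch.length - 1 by omega,
          pv_getD_append_left ch _ _ (by omega)]
        exact hc3 (by omega)
      · intro _
        rw [hch']
        simp only [List.length_append, List.length_singleton]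
        rw [show ch.length + 1 - 3 = ch.length - 2 by omega,
          pv_getD_append_left ch _ _ (by omega)]
        exact hc2 (by omega)
      · -- seen' = keys'
        show PySem.Set.add d.keys q0 = (d.insert q0 (PySem.Int.mod (pyCalculate sB) 10)).keys
        rw [PySem.Set.add_of_not_mem hmem, PySem.Dict.keys_insert_of_not_contains _ _ hA]
      · exact PySem.Dict.nodup_keys_insert _ _ _ hnd
      · intro q
        show (t.insert q0 (t.getD q0 0 + PySem.Int.mod (pyCalculate sB) 10)).getD q 0
            = t0.getD q 0 + (d.insert q0 (PySem.Int.mod (pyCalculate sB) 10)).getD q 0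
        rw [PySem.Dict.getD_insert, PySem.Dict.getD_insert]
        split_ifs with hq
        · rw [hget q0, PySem.Dict.getD_of_not_contains d 0 hA, hq]
          ring
        · exact hget q
      · -- totals keys
        show (t.insert q0 (t.getD q0 0 + PySem.Int.mod (pyCalculate sB) 10)).keys
            = PySem.Set.update t0.keys (d.insert q0 (PySem.Int.mod (pyCalculate sB) 10)).keys
        rw [PySem.Dict.keys_insert_of_not_contains _ _ hA, pv_set_update_snoc, ← hkeys]
        by_cases ht : q0 ∈ t.keys
        · rw [PySem.Set.add_of_mem ht, PySem.Dict.keys_insert_of_contains]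
          rw [PySem.Dict.contains_eq_decide_mem_keys]; simp [ht]
        · rw [PySem.Set.add_of_not_mem ht, PySem.Dict.keys_insert_of_not_contains]
          rw [PySem.Dict.contains_eq_decide_mem_keys]; simp [ht]
      · -- global sequences set
        show PySem.Set.add sq q0
            = PySem.Set.update sq0 (d.insert q0 (PySem.Int.mod (pyCalculate sB) 10)).keys
        rw [PySem.Dict.keys_insert_of_not_contains _ _ hA, pv_set_update_snoc, hsq]
  · -- fewer than four changes so far: both sides only roll the window
    have hA4 : ¬ 4 ≤ ch'.length := by omega
    rw [if_neg hA4]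
    have hB3 : ¬ (3:Int) ≤ (ch.length : Int) := by exact_mod_cast hbig
    rw [if_neg hB3]
    unfold PvInv
    refine ⟨rfl, rfl, ?_, ?_, ?_, rfl, hnd, hget, hkeys, hsq⟩
    · intro _
      simp only [hch', List.length_append, List.length_singleton,
        Nat.add_sub_cancel, pv_getD_append_last]
    · intro hl
      rw [hch']
      simp only [List.length_append, List.length_singleton]
      rw [show ch.length + 1 - 2 = ch.length - 1 by omega,
        pv_getD_append_left ch _ _ (by simp [hch'] at hl; omega)]
      exact hc3 (by simp [hch'] at hl; omega)
    · intro hl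
      rw [hch']
      simp only [List.length_append, List.length_singleton]
      rw [show ch.length + 1 - 3 = ch.length - 2 by omega,
        pv_getD_append_left ch _ _ (by simp [hch'] at hl; omega)]
      exact hc2 (by simp [hch'] at hl; omega)

lemma pv_fold_inv (m : Nat) : ∀ (a0 : Int) (t0 : PySem.Dict PvSeq Int) (sq0 : PySem.Set PvSeq)
    (a : PvAState) (b : PvBState), PvInv t0 sq0 a b → a0 = (a.changes.length : Int) →
    PvInv t0 sq0 ((PySem.List.pyRange a0 (a0 + m) 1).foldl (fun st _ => pyCstpStep st) a)
                 ((PySem.List.pyRange a0 (a0 + m) 1).foldl altBuyerStep b) := by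
  induction m with
  | zero =>
    intro a0 t0 sq0 a b hInv _
    rw [PySem.List.pyRange_one_eq_nil (by simp)]
    exact hInv
  | succ k ih =>
    intro a0 t0 sq0 a b hInv ha0
    rw [PySem.List.pyRange_one_cons (by omega)]
    simp only [List.foldl_cons]
    obtain ⟨hInv', hlen⟩ := pv_step_inv t0 sq0 a b hInv
    rw [← ha0] at hInv'
    have ha1 : a0 + 1 = (((pyCstpStep a).changes.length : Nat) : Int) := by
      rw [hlen, ha0]; push_cast; ring
    have := ih (a0 + 1) t0 sq0 (pyCstpStep a) (altBuyerStep b a0) hInv' ha1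
    rw [show (a0 + ((k + 1 : Nat) : Int)) = (a0 + 1) + (k : Int) by omega]
    exact this

lemma pv_buyer (secret0 n : Int) (t0 : PySem.Dict PvSeq Int) :
    PvInv t0 t0.keys
      ((PySem.List.pyRange 0 n 1).foldl (fun st _ => pyCstpStep st)
        { secret := secret0, changes := [], lastPrice := pyLastDigit secret0,
          stp := PySem.Dict.empty, seqs := t0.keys })
      ((PySem.List.pyRange 0 n 1).foldl altBuyerStep
        { secret := secret0, c1 := 0, c2 := 0, c3 := 0,
          lastPrice := PySem.Int.mod |secret0| 10,
          seen := PySem.Set.empty, totals := t0 }) := by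
  have hrange : PySem.List.pyRange 0 n 1 = PySem.List.pyRange 0 (0 + ((n.toNat : Nat) : Int)) 1 := by
    rw [PySem.List.pyRange_one, PySem.List.pyRange_one]
    congr 2
    omega
  rw [hrange]
  apply pv_fold_inv n.toNat 0 t0 t0.keys
  · refine ⟨rfl, (pv_lastDigit_eq secret0).symm ▸ ?_, ?_, ?_, ?_, ?_, ?_, ?_, ?_, ?_⟩
    · simp
    all_goals simp [PySem.Dict.keys_empty, PySem.Dict.getD_empty, PySem.Set.update_nil]
  · simp

-- the outer loop: B's running totals dict tracks A's list of per-buyer dicts and its sequence set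
lemma pv_outer (n : Int) (l : List Int) : ∀ (sq : PySem.Set PvSeq)
    (ds : List (PySem.Dict PvSeq Int)) (t : PySem.Dict PvSeq Int),
    t.keys = sq → sq.Nodup →
    (∀ q, t.getD q 0 = (ds.map (fun d => d.getD q 0)).sum) →
    (l.foldl (fun (totals : PySem.Dict PvSeq Int) secret0 =>
        ((PySem.List.pyRange 0 n 1).foldl altBuyerStep
          { secret := secret0, c1 := 0, c2 := 0, c3 := 0,
            lastPrice := PySem.Int.mod |secret0| 10,
            seen := PySem.Set.empty, totals := totals }).totals) t).keys
      = (l.foldl (fun (acc : PySem.Set PvSeq × List (PySem.Dict PvSeq Int)) secret_number =>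
          let r := calculate_sequence_to_price secret_number n acc.1
          (r.2, acc.2 ++ [r.1])) (sq, ds)).1 ∧
    (l.foldl (fun (acc : PySem.Set PvSeq × List (PySem.Dict PvSeq Int)) secret_number =>
          let r := calculate_sequence_to_price secret_number n acc.1
          (r.2, acc.2 ++ [r.1])) (sq, ds)).1.Nodup ∧
    (∀ q, (l.foldl (fun (totals : PySem.Dict PvSeq Int) secret0 =>
        ((PySem.List.pyRange 0 n 1).foldl altBuyerStep
          { secret := secret0, c1 := 0, c2 := 0, c3 := 0,
            lastPrice := PySem.Int.mod |secret0| 10,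
            seen := PySem.Set.empty, totals := totals }).totals) t).getD q 0
      = ((l.foldl (fun (acc : PySem.Set PvSeq × List (PySem.Dict PvSeq Int)) secret_number =>
          let r := calculate_sequence_to_price secret_number n acc.1
          (r.2, acc.2 ++ [r.1])) (sq, ds)).2.map (fun d => d.getD q 0)).sum) := by
  induction l with
  | nil =>
    intro sq ds t hk hnd hg
    exact ⟨hk, hnd, hg⟩
  | cons s rest ih =>
    intro sq ds t hk hnd hg
    simp only [List.foldl_cons]
    have hInv := pv_buyer s n t
    set stA := (PySem.List.pyRange 0 n 1).foldl (fun st _ => pyCstpStep st)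
      { secret := s, changes := [], lastPrice := pyLastDigit s,
        stp := PySem.Dict.empty, seqs := t.keys } with hstA
    set stB := (PySem.List.pyRange 0 n 1).foldl altBuyerStep
      { secret := s, c1 := 0, c2 := 0, c3 := 0,
        lastPrice := PySem.Int.mod |s| 10,
        seen := PySem.Set.empty, totals := t } with hstB
    obtain ⟨-, -, -, -, -, -, hdnd, hget, hkeys, hsq⟩ := hInv
    have hcstp : calculate_sequence_to_price s n sq = (stA.stp, stA.seqs) := by
      rw [← hk]
      rfl
    have h1 : stB.totals.keys = stA.seqs := by
      rw [hkeys, hsq, hk]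
    have h2 : stA.seqs.Nodup := by
      rw [hsq, hk]
      exact PySem.Set.nodup_update _ _ hnd
    have h3 : ∀ q, stB.totals.getD q 0 = ((ds ++ [stA.stp]).map (fun d => d.getD q 0)).sum := by
      intro q
      rw [hget q, hg q]
      simp
    have := ih stA.seqs (ds ++ [stA.stp]) stB.totals h1 h2 h3
    simpa only [hcstp] using this

-- ===== VERDICT (by name: the statement is the Claim_ definition above) =====
theorem find_best_sequence_spec : Claim_equal_find_best_sequence := by
  intro input n _
  unfold Spec_find_best_sequence
  unfold find_best_sequence find_best_sequence_alt
  obtain ⟨hk, hnd, hg⟩ := pv_outer n input PySem.Set.empty [] PySem.Dict.empty rfl (by simp [PySem.Set.empty]) (by simp [PySem.Dict.getD_empty])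
  set accA := input.foldl (fun (acc : PySem.Set PvSeq × List (PySem.Dict PvSeq Int)) secret_number =>
      let r := calculate_sequence_to_price secret_number n acc.1
      (r.2, acc.2 ++ [r.1])) (PySem.Set.empty, []) with haccA
  set tB := input.foldl (fun (totals : PySem.Dict PvSeq Int) secret0 =>
      ((PySem.List.pyRange 0 n 1).foldl altBuyerStep
        { secret := secret0, c1 := 0, c2 := 0, c3 := 0,
          lastPrice := PySem.Int.mod |secret0| 10,
          seen := PySem.Set.empty, totals := totals }).totals) PySem.Dict.empty with htB
  have hndk : tB.keys.Nodup := by rw [hk]; exact hnd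
  show (List.foldl (fun max_bananas sequence =>
      max max_bananas ((accA.2.map (fun sequence_to_price => sequence_to_price.getD sequence 0)).sum))
      0 accA.1)
    = List.foldl (fun best v => max best v) 0 tB.values
  rw [PySem.Dict.values_eq_map_keys tB hndk 0, List.foldl_map, hk]
  have hf : (fun (x : Int) (y : PvSeq) => max x (tB.getD y 0))
      = (fun x y => max x ((accA.2.map (fun d => d.getD y 0)).sum)) := by
    funext x y
    rw [hg y]
  rw [hf]
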